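-- pv_equiv track=rewrite | github.com/hareshaprajapati/langgraph-agentic-ai | Single_V2_0/Saturday/Siko_Sat.py | _decade_vector
-- ===== SOURCE A (Python) =====
-- from typing import List, Dict, Tuple
--
-- DECADE_BANDS: List[Tuple[int, int, int]] = [
--     (1, 1, 10),
--     (2, 11, 20),
--     (3, 21, 30),
--     (4, 31, 40),
--     (5, 41, 45),
-- ]
--
-- def _decade_vector(nums: List[int]) -> Dict[int, int]:
--     vec = {k: 0 for k, _, _ in DECADE_BANDS}
--     for n in nums:
--         for k, lo, hi in DECADE_BANDS:
--             if lo <= n <= hi: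
--                 vec[k] += 1
--                 break
--     return vec
-- ===== SOURCE B (Python) =====
-- from typing import List, Dict, Tuple
--
-- DECADE_BANDS: List[Tuple[int, int, int]] = [
--     (1, 1, 10),
--     (2, 11, 20),
--     (3, 21, 30),
--     (4, 31, 40),
--     (5, 41, 45),
-- ]
--
-- def _decade_vector(nums: List[int]) -> Dict[int, int]:
--     # band-outer: one independent scan of nums per band
--     return {k: sum(1 for n in nums if lo <= n <= hi) for k, lo, hi in DECADE_BANDS}
-- ===== Notes on version B (the rewrite author's own statement) =====
-- stated objective: alternative
-- what changed: Replaces A's number-outer single pass with break-on-first-band and a mutated dict by a band-outer dict comprehension that counts each band with its own scan of nums; correct because the bands are disjoint.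
import Mathlib
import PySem

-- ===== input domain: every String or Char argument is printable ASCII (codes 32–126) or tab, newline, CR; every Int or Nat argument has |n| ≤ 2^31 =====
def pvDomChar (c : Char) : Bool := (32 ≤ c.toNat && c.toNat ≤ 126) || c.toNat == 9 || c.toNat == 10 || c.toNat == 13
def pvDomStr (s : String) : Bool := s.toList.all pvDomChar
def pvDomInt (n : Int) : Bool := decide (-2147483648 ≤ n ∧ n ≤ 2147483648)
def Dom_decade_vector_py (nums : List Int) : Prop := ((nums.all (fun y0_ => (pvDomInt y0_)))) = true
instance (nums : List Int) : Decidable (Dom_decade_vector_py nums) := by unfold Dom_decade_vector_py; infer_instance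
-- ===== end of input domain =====

-- B replaces A's number-outer pass with break by a band-outer count per band (alternative decomposition, same cost).


-- DECADE_BANDS (module constant shared by both ports)
def pvDecadeBands : List (Int × Int × Int) := [(1, 1, 10), (2, 11, 20), (3, 21, 30), (4, 31, 40), (5, 41, 45)]

-- ===== PORT A =====
-- inner 'for k, lo, hi in DECADE_BANDS: if lo <= n <= hi: vec[k] += 1; break'
def pvInnerA (vec : PySem.Dict Int Int) (n : Int) : List (Int × Int × Int) → PySem.Dict Int Int
  | [] => vec
  | (k, lo, hi) :: rest =>
      if lo ≤ n ∧ n ≤ hi then vec.modify k 0 (· + 1) else pvInnerA vec n rest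

def decade_vector_py (nums : List Int) : List (Int × Int) :=
  let vec := pvDecadeBands.foldl (fun d t => d.insert t.1 0) PySem.Dict.empty
  (nums.foldl (fun vec n => pvInnerA vec n pvDecadeBands) vec).items

-- ===== PORT B =====
def decade_vector_py_alt (nums : List Int) : List (Int × Int) :=
  pvDecadeBands.map (fun t =>
    (t.1, ((nums.filter (fun n => decide (t.2.1 ≤ n) && decide (n ≤ t.2.2))).length : Int)))

-- ===== PRECONDITION & SPEC =====
def Spec_decade_vector_py (nums : List Int) (out : List (Int × Int)) : Prop := out = decade_vector_py_alt nums
instance (nums : List Int) (out : List (Int × Int)) : Decidable (Spec_decade_vector_py nums out) := by unfold Spec_decade_vector_py; infer_instance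

-- ===== CLAIM (what is proved, stated in full; the proofs are below) =====
def Claim_equal_decade_vector_py : Prop := ∀ (nums : List Int), Dom_decade_vector_py nums → Spec_decade_vector_py nums (decade_vector_py nums)

-- ===== LEMMAS AND PROOFS =====

-- count of elements of nums in band [lo, hi], matching B's filter
def pvCnt (lo hi : Int) (nums : List Int) : Int :=
  ((nums.filter (fun n => decide (lo ≤ n) && decide (n ≤ hi))).length : Int)

lemma pv_main (nums : List Int) : ∀ a b c d e : Int,
    nums.foldl (fun vec n => pvInnerA vec n pvDecadeBands)
      (PySem.Dict.mk [(1, a), (2, b), (3, c), (4, d), (5, e)]) =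
    PySem.Dict.mk [(1, a + pvCnt 1 10 nums), (2, b + pvCnt 11 20 nums),
                   (3, c + pvCnt 21 30 nums), (4, d + pvCnt 31 40 nums),
                   (5, e + pvCnt 41 45 nums)] := by
  induction nums with
  | nil => intro a b c d e; simp [pvCnt]
  | cons n tl ih =>
    intro a b c d e
    rw [List.foldl_cons]
    by_cases h1 : 1 ≤ n ∧ n ≤ 10
    · have : pvInnerA (PySem.Dict.mk [(1, a), (2, b), (3, c), (4, d), (5, e)]) n pvDecadeBands
          = PySem.Dict.mk [(1, a + 1), (2, b), (3, c), (4, d), (5, e)] := by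
        simp [pvInnerA, pvDecadeBands, h1, PySem.Dict.modify, PySem.Dict.contains,
              PySem.Dict.getD, PySem.Dict.get?, PySem.Dict.insert]
      rw [this, ih]
      simp [pvCnt, List.filter_cons]
      constructor
      · rw [if_pos (by simp [h1.1, h1.2])]; push_cast [List.length_cons]; ring
      · refine ⟨?_, ?_, ?_, ?_⟩ <;> (rw [if_neg (by simp; omega)])
    · by_cases h2 : 11 ≤ n ∧ n ≤ 20
      · have : pvInnerA (PySem.Dict.mk [(1, a), (2, b), (3, c), (4, d), (5, e)]) n pvDecadeBands
            = PySem.Dict.mk [(1, a), (2, b + 1), (3, c), (4, d), (5, e)] := by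
          simp [pvInnerA, pvDecadeBands, h1, h2, PySem.Dict.modify, PySem.Dict.contains,
                PySem.Dict.getD, PySem.Dict.get?, PySem.Dict.insert]
        rw [this, ih]
        simp [pvCnt, List.filter_cons]
        refine ⟨?_, ?_, ?_, ?_, ?_⟩
        · rw [if_neg (by simp; omega)]
        · rw [if_pos (by simp [h2.1, h2.2])]; push_cast [List.length_cons]; ring
        all_goals rw [if_neg (by simp; omega)]
      · by_cases h3 : 21 ≤ n ∧ n ≤ 30
        · have : pvInnerA (PySem.Dict.mk [(1, a), (2, b), (3, c), (4, d), (5, e)]) n pvDecadeBands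
              = PySem.Dict.mk [(1, a), (2, b), (3, c + 1), (4, d), (5, e)] := by
            simp [pvInnerA, pvDecadeBands, h1, h2, h3, PySem.Dict.modify, PySem.Dict.contains,
                  PySem.Dict.getD, PySem.Dict.get?, PySem.Dict.insert]
          rw [this, ih]
          simp [pvCnt, List.filter_cons]
          refine ⟨?_, ?_, ?_, ?_, ?_⟩
          · rw [if_neg (by simp; omega)]
          · rw [if_neg (by simp; omega)]
          · rw [if_pos (by simp [h3.1, h3.2])]; push_cast [List.length_cons]; ring
          all_goals rw [if_neg (by simp; omega)]
        · by_cases h4 : 31 ≤ n ∧ n ≤ 40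
          · have : pvInnerA (PySem.Dict.mk [(1, a), (2, b), (3, c), (4, d), (5, e)]) n pvDecadeBands
                = PySem.Dict.mk [(1, a), (2, b), (3, c), (4, d + 1), (5, e)] := by
              simp [pvInnerA, pvDecadeBands, h1, h2, h3, h4, PySem.Dict.modify, PySem.Dict.contains,
                    PySem.Dict.getD, PySem.Dict.get?, PySem.Dict.insert]
            rw [this, ih]
            simp [pvCnt, List.filter_cons]
            refine ⟨?_, ?_, ?_, ?_, ?_⟩
            · rw [if_neg (by simp; omega)]
            · rw [if_neg (by simp; omega)]
            · rw [if_neg (by simp; omega)]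
            · rw [if_pos (by simp [h4.1, h4.2])]; push_cast [List.length_cons]; ring
            · rw [if_neg (by simp; omega)]
          · by_cases h5 : 41 ≤ n ∧ n ≤ 45
            · have : pvInnerA (PySem.Dict.mk [(1, a), (2, b), (3, c), (4, d), (5, e)]) n pvDecadeBands
                  = PySem.Dict.mk [(1, a), (2, b), (3, c), (4, d), (5, e + 1)] := by
                simp [pvInnerA, pvDecadeBands, h1, h2, h3, h4, h5, PySem.Dict.modify, PySem.Dict.contains,
                      PySem.Dict.getD, PySem.Dict.get?, PySem.Dict.insert]
              rw [this, ih]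
              simp [pvCnt, List.filter_cons]
              refine ⟨?_, ?_, ?_, ?_, ?_⟩
              · rw [if_neg (by simp; omega)]
              · rw [if_neg (by simp; omega)]
              · rw [if_neg (by simp; omega)]
              · rw [if_neg (by simp; omega)]
              · rw [if_pos (by simp [h5.1, h5.2])]; push_cast [List.length_cons]; ring
            · have : pvInnerA (PySem.Dict.mk [(1, a), (2, b), (3, c), (4, d), (5, e)]) n pvDecadeBands
                  = PySem.Dict.mk [(1, a), (2, b), (3, c), (4, d), (5, e)] := by
                simp [pvInnerA, pvDecadeBands, h1, h2, h3, h4, h5]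
              rw [this, ih]
              simp [pvCnt, List.filter_cons]
              refine ⟨?_, ?_, ?_, ?_, ?_⟩ <;> rw [if_neg (by simp; omega)]

-- ===== VERDICT (by name: the statement is the Claim_ definition above) =====
theorem decade_vector_py_spec : Claim_equal_decade_vector_py := by
  intro nums _
  unfold Spec_decade_vector_py
  have h0 : decade_vector_py nums
      = (List.foldl (fun vec n => pvInnerA vec n pvDecadeBands)
          (PySem.Dict.mk [(1, 0), (2, 0), (3, 0), (4, 0), (5, 0)]) nums).items := rfl
  rw [h0, pv_main]
  simp [decade_vector_py_alt, pvDecadeBands, pvCnt]
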